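-- pv_equiv track=rewrite | github.com/chrehall68/advent-of-code-2023 | day13/solution.py | search_col_reflections
-- ===== SOURCE A (Python) =====
-- from typing import List, Tuple
--
-- def is_col_reflection(m: List[List[str]], i: int) -> Tuple[bool, List[List[bool]]]:
--     """
--     Returns:
--         - bool - whether or not the column is a perfect reflection
--         - List[List[int]] - list of differences (True means difference). Outer list is the column, inner list is the rows
--             that differed for that column
--     """
--     # reflection on col 'i' means in the space before the col
--     all_difs = []
--     ret = True
--
--     for col in range(min(i, len(m[0]) - i)):
--         difs = list(map(lambda row: row[i - col - 1] != row[i + col], m))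
--         if any(difs):
--             ret = False
--         all_difs.append(difs)
--     return ret, all_difs
--
-- def search_col_reflections(m: List[str], cols_to_exclude: List[int] = []) -> int:
--     lines_reflected = 0
--     count = 0
--     for col in range(1, len(m[0])):
--         if col in cols_to_exclude:
--             continue
--         if is_col_reflection(m, col)[0]:
--             lines_reflected += col
--             count += 1
--     assert count <= 1
--     return lines_reflected
-- ===== SOURCE B (Python) =====
-- def search_col_reflections(m, cols_to_exclude=[]):
--     # Transpose the grid once into column strings; a reflection at c is then a
--     # single reversed-slice comparison of columns instead of per-cell checks.
--     cols = [''.join(t) for t in zip(*m)]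
--     excluded = set(cols_to_exclude)
--     w = len(m[0])
--     total = 0
--     for c in range(1, w):
--         if c in excluded:
--             continue
--         k = min(c, w - c)
--         if cols[c - k:c][::-1] == cols[c:c + k]:
--             total += c
--     return total
-- ===== Notes on version B (the rewrite author's own statement) =====
-- stated objective: alternative
-- what changed: B transposes the grid once into column strings and tests each candidate column by one reversed-slice comparison of whole columns (with set-based exclusion), instead of A's per-offset inner loop building a difference matrix over all rows for every column.
-- outside the precondition, e.g. on search_col_reflections(['abc', 'ab'], [2]): A returns 0, B returns 0
import Mathlib
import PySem

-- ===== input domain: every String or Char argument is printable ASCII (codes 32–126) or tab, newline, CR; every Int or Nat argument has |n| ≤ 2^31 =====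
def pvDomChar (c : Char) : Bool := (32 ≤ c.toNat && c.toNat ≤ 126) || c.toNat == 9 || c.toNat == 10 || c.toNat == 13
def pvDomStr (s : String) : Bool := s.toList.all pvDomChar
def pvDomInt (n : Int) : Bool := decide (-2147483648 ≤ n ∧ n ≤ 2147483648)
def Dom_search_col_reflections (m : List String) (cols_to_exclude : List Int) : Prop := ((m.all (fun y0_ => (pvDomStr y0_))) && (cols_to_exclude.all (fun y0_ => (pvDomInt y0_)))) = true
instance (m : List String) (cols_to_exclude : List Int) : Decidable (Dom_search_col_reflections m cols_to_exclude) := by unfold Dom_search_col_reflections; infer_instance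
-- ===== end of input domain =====

-- B replaces A's per-offset difference-matrix scan by one transposition into column
-- strings plus a reversed-slice comparison per candidate column (objective: alternative).
-- ===== PORT A =====
def is_col_reflection (m : List String) (i : Int) : Bool × List (List Bool) :=
  -- exact on Pre_: every character index reached is in range there
  let w : Int := PySem.Str.len ((PySem.List.pyGet? m 0).getD "")
  (PySem.List.pyRange 0 (min i (w - i)) 1).foldl
    (fun (st : Bool × List (List Bool)) col =>
      ((if (m.map (fun row =>
            PySem.Str.pyGet? row (i - col - 1) != PySem.Str.pyGet? row (i + col))).any id
        then false else st.1),
       st.2 ++ [m.map (fun row =>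
            PySem.Str.pyGet? row (i - col - 1) != PySem.Str.pyGet? row (i + col))]))
    (true, [])

def search_col_reflections (m : List String) (cols_to_exclude : List Int) : Int :=
  -- A's `assert count <= 1` raises exactly where Pre_'s last conjunct fails
  let w : Int := PySem.Str.len ((PySem.List.pyGet? m 0).getD "")
  ((PySem.List.pyRange 1 w 1).foldl
    (fun (st : Int × Int) col =>
      if cols_to_exclude.contains col then st
      else if (is_col_reflection m col).1 then (st.1 + col, st.2 + 1) else st)
    (0, 0)).1

-- ===== PORT B =====
-- zip(*m) followed by ''.join: the j-th column as a string, for j below the minimum row length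
def pyZipJoin (rows : List (List Char)) : List String :=
  let n : Nat := match rows with
    | [] => 0
    | r :: rs => rs.foldl (fun a s => min a s.length) r.length
  (List.range n).map (fun j => String.ofList (rows.map (fun r => (r[j]?).getD ' ')))
  -- exact: j < n ≤ every row length, so the getD default is never used

def search_col_reflections_alt (m : List String) (cols_to_exclude : List Int) : Int :=
  let cols : List String := pyZipJoin (m.map String.toList)
  let excluded : PySem.Set Int := PySem.Set.ofList cols_to_exclude
  let w : Int := PySem.Str.len ((PySem.List.pyGet? m 0).getD "")
  (PySem.List.pyRange 1 w 1).foldl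
    (fun (total : Int) c =>
      if PySem.Set.contains excluded c then total
      else
        let k := min c (w - c)
        if (PySem.List.slice cols (some (c - k)) (some c)).reverse
             == PySem.List.slice cols (some c) (some (c + k)) then total + c
        else total)
    0

-- ===== PRECONDITION & SPEC =====
-- "column c of a grid m whose first row has width w is a perfect reflection"
def colReflAt (m : List String) (w c : Int) : Bool :=
  (List.range (min c (w - c)).toNat).all (fun j => m.all (fun s =>
    PySem.Str.pyGet? s (c - (j : Int) - 1) == PySem.Str.pyGet? s (c + (j : Int))))

-- Pre_ excludes: empty m (A raises IndexError on m[0]); ragged grids whose rows are shorter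
-- than the first row when its width exceeds 1 (A may raise IndexError there, depending on
-- which columns are reached); and grids with two or more reflective non-excluded columns,
-- where A's `assert count <= 1` raises AssertionError.
def Pre_search_col_reflections (m : List String) (cols_to_exclude : List Int) : Prop :=
  m ≠ [] ∧
  (((m.headD "").length : Int) ≤ 1 ∨ ∀ s ∈ m, ((m.headD "").length : Int) ≤ (s.length : Int)) ∧
  (PySem.List.pyRange 1 ((m.headD "").length : Int) 1).countP
      (fun c => !(cols_to_exclude.contains c) && colReflAt m ((m.headD "").length : Int) c) ≤ 1

instance (m : List String) (cols_to_exclude : List Int) : Decidable (Pre_search_col_reflections m cols_to_exclude) := by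
  unfold Pre_search_col_reflections; infer_instance

def pvWitness_search_col_reflections : List String × List Int := (["aa", "ba"], [])

def Spec_search_col_reflections (m : List String) (cols_to_exclude : List Int) (out : Int) : Prop := out = search_col_reflections_alt m cols_to_exclude
instance (m : List String) (cols_to_exclude : List Int) (out : Int) : Decidable (Spec_search_col_reflections m cols_to_exclude out) := by unfold Spec_search_col_reflections; infer_instance

-- ===== CLAIM (what is proved, stated in full; the proofs are below) =====
def Claim_equal_search_col_reflections : Prop := ∀ (m : List String) (cols_to_exclude : List Int), Dom_search_col_reflections m cols_to_exclude → Pre_search_col_reflections m cols_to_exclude → Spec_search_col_reflections m cols_to_exclude (search_col_reflections m cols_to_exclude)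

-- ===== LEMMAS AND PROOFS =====

-- the Bool flag of A's difference-matrix fold is the conjunction of per-offset checks
theorem foldl_flag {b2 : Type} (L : List Int) (p : Int → Bool) (q : Int → b2)
    (b : Bool) (acc : List b2) :
    (L.foldl (fun (st : Bool × List b2) col =>
        ((if p col then false else st.1), st.2 ++ [q col])) (b, acc)).1
      = (b && L.all (fun c => !p c)) := by
  induction L generalizing b acc with
  | nil => simp
  | cons x xs ih =>
    simp only [List.foldl_cons, List.all_cons]
    rw [ih]
    by_cases hx : p x <;> simp [hx]

-- compare the first component of A's pair-valued fold with a plain Int fold, step by step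
theorem foldl_pair_fst (L : List Int) (gA : Int × Int → Int → Int × Int) (gB : Int → Int → Int)
    (h : ∀ t cnt c, c ∈ L → (gA (t, cnt) c).1 = gB t c) (t cnt : Int) :
    (L.foldl gA (t, cnt)).1 = L.foldl gB t := by
  induction L generalizing t cnt with
  | nil => rfl
  | cons x xs ih =>
    simp only [List.foldl_cons]
    have h1 : gA (t, cnt) x = ((gA (t, cnt) x).1, (gA (t, cnt) x).2) := rfl
    have hx := h t cnt x List.mem_cons_self
    rw [h1, hx]
    exact ih (fun t cnt c hm => h t cnt c (List.mem_cons_of_mem _ hm)) _ _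

theorem le_foldl_min (rs : List (List Char)) (a w : Nat) (ha : w ≤ a)
    (h : ∀ s ∈ rs, w ≤ s.length) :
    w ≤ rs.foldl (fun x t => min x t.length) a := by
  induction rs generalizing a with
  | nil => simpa using ha
  | cons r rs ih =>
    simp only [List.foldl_cons]
    exact ih _ (le_min ha (h r List.mem_cons_self)) (fun s hs => h s (List.mem_cons_of_mem _ hs))

def pvMinLen (rows : List (List Char)) : Nat := match rows with
  | [] => 0
  | r :: rs => rs.foldl (fun a s => min a s.length) r.length

def pvColFn (rows : List (List Char)) (j : Nat) : String :=
  String.ofList (rows.map (fun r => (r[j]?).getD ' '))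

theorem pyZipJoin_def (rows : List (List Char)) :
    pyZipJoin rows = (List.range (pvMinLen rows)).map (pvColFn rows) := by
  cases rows <;> rfl

theorem w_le_pvMinLen (m : List String) (hne : m ≠ []) (w : Nat)
    (hw : (m.headD "").length = w) (hlen : ∀ s ∈ m, w ≤ s.length) :
    w ≤ pvMinLen (m.map String.toList) := by
  cases m with
  | nil => exact absurd rfl hne
  | cons s ms =>
    show w ≤ (ms.map String.toList).foldl (fun a t => min a t.length) s.toList.length
    apply le_foldl_min
    · simpa using hlen s List.mem_cons_self
    · intro r hr
      obtain ⟨t, ht, rfl⟩ := List.mem_map.1 hr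
      simpa using hlen t (List.mem_cons_of_mem _ ht)

theorem ofList_inj (a b : List Char) : String.ofList a = String.ofList b ↔ a = b :=
  ⟨fun h => by simpa using congrArg String.toList h, fun h => by rw [h]⟩

theorem bool_eq_of_iff {a b : Bool} (h : a = true ↔ b = true) : a = b := by
  rw [Bool.eq_iff_iff]; exact h

theorem wEq (m : List String) (hne : m ≠ []) :
    PySem.Str.len ((PySem.List.pyGet? m 0).getD "") = ((m.headD "").length : Int) := by
  cases m with
  | nil => exact absurd rfl hne
  | cons s t => rw [PySem.List.pyGet?_zero_cons]; simp [PySem.Str.len_eq]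

-- A's per-column flag is the reflection predicate
theorem isColRefl_fst (m : List String) (i : Int) :
    (is_col_reflection m i).1
      = colReflAt m (PySem.Str.len ((PySem.List.pyGet? m 0).getD "")) i := by
  unfold is_col_reflection
  rw [foldl_flag _
    (fun col => (m.map (fun row =>
      PySem.Str.pyGet? row (i - col - 1) != PySem.Str.pyGet? row (i + col))).any id)
    (fun col => m.map (fun row =>
      PySem.Str.pyGet? row (i - col - 1) != PySem.Str.pyGet? row (i + col)))]
  rw [Bool.true_and, PySem.List.pyRange_one]
  unfold colReflAt
  apply bool_eq_of_iff
  simp only [List.all_map, List.all_eq_true, List.mem_range, List.any_map,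
    Function.comp, Int.sub_zero, Bool.not_eq_true', id_eq, zero_add,
    List.any_eq_false, bne_iff_ne, ne_eq, not_not, beq_iff_eq]


-- B's reversed-slice comparison of column strings is the same reflection predicate
theorem decision_eq (m : List String) (hne : m ≠ []) (w : Nat)
    (hw : (m.headD "").length = w) (hlen : ∀ s ∈ m, w ≤ s.length)
    (cn : Nat) (hc1 : 1 ≤ cn) (hcw : cn < w) :
    ((PySem.List.slice (pyZipJoin (m.map String.toList))
        (some ((cn : Int) - min (cn : Int) ((w : Int) - (cn : Int)))) (some (cn : Int))).reverse
      == PySem.List.slice (pyZipJoin (m.map String.toList)) (some (cn : Int))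
          (some ((cn : Int) + min (cn : Int) ((w : Int) - (cn : Int)))))
    = colReflAt m (w : Int) (cn : Int) := by
  have hmin : min (cn : Int) ((w : Int) - (cn : Int)) = ((min cn (w - cn) : Nat) : Int) := by omega
  set kn : Nat := min cn (w - cn) with hkn
  have hkc : kn ≤ cn := by omega
  have hkwc : cn + kn ≤ w := by omega
  have hn : w ≤ pvMinLen (m.map String.toList) := w_le_pvMinLen m hne w hw hlen
  have hlen' : ∀ r ∈ m.map String.toList, w ≤ r.length := by
    intro r hr; obtain ⟨t, ht, rfl⟩ := List.mem_map.1 hr; simpa using hlen t ht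
  have e1 : (cn : Int) - (kn : Int) = ((cn - kn : Nat) : Int) := by omega
  have e2 : (cn : Int) + (kn : Int) = ((cn + kn : Nat) : Int) := by omega
  rw [hmin, e1, e2, PySem.List.slice_natCast, PySem.List.slice_natCast, pyZipJoin_def]
  set rows : List (List Char) := m.map String.toList with hrows
  set N : Nat := pvMinLen rows with hN
  have e3 : cn - (cn - kn) = kn := by omega
  have e4 : (cn + kn) - cn = kn := by omega
  rw [e3, e4]
  have hS2 : (((List.range N).map (pvColFn rows)).drop cn).take kn
      = (List.range kn).map (fun j => pvColFn rows (cn + j)) := by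
    apply List.ext_getElem
    · simp; omega
    · intro i h1 h2
      simp only [List.getElem_take, List.getElem_drop, List.getElem_map, List.getElem_range]
  have hS1 : ((((List.range N).map (pvColFn rows)).drop (cn - kn)).take kn).reverse
      = (List.range kn).map (fun j => pvColFn rows (cn - 1 - j)) := by
    apply List.ext_getElem
    · simp; omega
    · intro i h1 h2
      rw [List.getElem_reverse]
      simp only [List.getElem_take, List.getElem_drop, List.getElem_map, List.getElem_range]
      congr 1
      simp only [List.length_reverse, List.length_take, List.length_drop, List.length_map,
        List.length_range] at h1 h2 ⊢
      omega
  rw [hS1, hS2]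
  apply bool_eq_of_iff
  rw [beq_iff_eq, List.map_inj_left]
  unfold colReflAt
  rw [hmin]
  simp only [Int.toNat_natCast, List.all_eq_true, List.mem_range, beq_iff_eq]
  have key : ∀ j : Nat, j < kn →
      ((pvColFn rows (cn - 1 - j) = pvColFn rows (cn + j)) ↔
        (∀ s ∈ m, PySem.Str.pyGet? s ((cn : Int) - (j : Int) - 1)
            = PySem.Str.pyGet? s ((cn : Int) + (j : Int)))) := by
    intro j hj
    unfold pvColFn
    rw [ofList_inj, List.map_inj_left, hrows, List.forall_mem_map]
    apply forall_congr'
    intro s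
    apply imp_congr_right
    intro hs
    have hls : w ≤ s.toList.length := by simpa using hlen s hs
    have i1 : (cn : Int) - (j : Int) - 1 = ((cn - 1 - j : Nat) : Int) := by omega
    have i2 : (cn : Int) + (j : Int) = ((cn + j : Nat) : Int) := by omega
    rw [i1, i2, PySem.Str.pyGet?_natCast, PySem.Str.pyGet?_natCast]
    have g1 : cn - 1 - j < s.toList.length := by omega
    have g2 : cn + j < s.toList.length := by omega
    rw [List.getElem?_eq_getElem g1, List.getElem?_eq_getElem g2]
    simp
  constructor
  · intro h j hj
    exact (key j hj).1 (h j hj)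
  · intro h j hj
    exact (key j hj).2 (h j hj)

-- ===== VERDICT (by name: the statement is the Claim_ definition above) =====
theorem search_col_reflections_spec : Claim_equal_search_col_reflections := by
  intro m ex _hDom hPre
  obtain ⟨hne, hlenOr, _hcnt⟩ := hPre
  unfold Spec_search_col_reflections search_col_reflections search_col_reflections_alt
  dsimp only
  have hwEq : PySem.Str.len ((PySem.List.pyGet? m 0).getD "") = ((m.headD "").length : Int) :=
    wEq m hne
  by_cases hw1 : PySem.Str.len ((PySem.List.pyGet? m 0).getD "") ≤ 1
  · rw [PySem.List.pyRange_one_eq_nil hw1]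
    rfl
  · set w : Nat := (m.headD "").length with hwdef
    have hlen : ∀ s ∈ m, w ≤ s.length := by
      rcases hlenOr with h | h
      · exfalso; omega
      · intro s hs; have := h s hs; omega
    apply foldl_pair_fst
    intro t cnt c hc
    obtain ⟨hc1, hcW⟩ := PySem.List.mem_pyRange_one.1 hc
    rw [hwEq] at hcW
    obtain ⟨cn, rfl⟩ : ∃ n : Nat, c = (n : Int) := ⟨c.toNat, by omega⟩
    have hcont : PySem.Set.contains (PySem.Set.ofList ex) ((cn : Nat) : Int)
        = ex.contains ((cn : Nat) : Int) := by
      apply bool_eq_of_iff; simp [PySem.Set.mem_ofList]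
    rw [hcont]
    by_cases hex : ex.contains ((cn : Nat) : Int) = true
    · rw [if_pos hex, if_pos hex]
    · rw [if_neg hex, if_neg hex]
      have hA := isColRefl_fst m ((cn : Nat) : Int)
      rw [hwEq] at hA
      have hB := decision_eq m hne w rfl hlen cn (by omega) (by omega)
      rw [hwEq, hA, hB]
      cases colReflAt m ((w : Nat) : Int) ((cn : Nat) : Int) <;> simp
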